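-- pv_equiv track=rewrite | github.com/6RoseJiang/AIM-coursework | AIM/magic.py | evaluate
-- ===== SOURCE A (Python) =====
-- def evaluate(x, n, M):
--     obj = 0
--     for i in range(n):
--         row_sum = 0
--         col_sum = 0
--         for j in range(n):
--             row_sum += x[i*n+j]
--             col_sum += x[j*n+i]
--         obj += abs(row_sum - M) + abs(col_sum - M)
--     diag_sum1 = 0
--     diag_sum2 = 0
--     for i in range(n):
--         diag_sum1 += x[i*n+i]
--         diag_sum2 += x[i*n+(n-i-1)]
--     obj += abs(diag_sum1 - M) + abs(diag_sum2 - M)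
--     return obj
-- ===== SOURCE B (Python) =====
-- def evaluate(x, n, M):
--     rows = [0] * n
--     cols = [0] * n
--     diag = 0
--     anti = 0
--     for k in range(len(rows) * len(cols)):
--         i, j = divmod(k, n)
--         v = x[k]
--         rows[i] += v
--         cols[j] += v
--         if i == j:
--             diag += v
--         if i + j == n - 1:
--             anti += v
--     return (sum(abs(s - M) for s in rows)
--             + sum(abs(s - M) for s in cols)
--             + abs(diag - M) + abs(anti - M))
-- ===== Notes on version B (the rewrite author's own statement) =====
-- stated objective: alternative
-- what changed: B replaces A's per-line nested re-scans by a single flat pass over the n*n cells that recovers (i,j) with divmod(k,n) and accumulates into row/column sum arrays and two diagonal accumulators, followed by a separate aggregation pass over the accumulated sums.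
import Mathlib
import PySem

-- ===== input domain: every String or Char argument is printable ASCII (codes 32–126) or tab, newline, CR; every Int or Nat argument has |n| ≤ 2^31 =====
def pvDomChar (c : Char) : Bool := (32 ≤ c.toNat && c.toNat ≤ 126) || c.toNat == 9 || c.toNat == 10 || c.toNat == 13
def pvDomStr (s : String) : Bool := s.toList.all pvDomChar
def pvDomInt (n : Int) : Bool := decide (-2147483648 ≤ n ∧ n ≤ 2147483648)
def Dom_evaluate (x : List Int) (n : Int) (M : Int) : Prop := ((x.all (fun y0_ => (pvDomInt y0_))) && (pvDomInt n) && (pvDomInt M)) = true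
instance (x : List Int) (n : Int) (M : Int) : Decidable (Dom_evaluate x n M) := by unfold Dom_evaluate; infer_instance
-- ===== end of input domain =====

-- B replaces A's per-line nested loops by a single flat divmod pass over the n*n cells
-- accumulating into row/column sum arrays and two diagonal accumulators, then aggregates
-- the deviations in a separate pass; same value, same cost ("alternative").

-- ===== PORT A =====
-- indexing x[k] is ported as pyGetD x k 0; Pre_evaluate restricts to the inputs where
-- every index is in range, i.e. where the Python does not raise IndexError.
def evaluate (x : List Int) (n : Int) (M : Int) : Int :=
  let obj : Int :=
    (PySem.List.pyRange 0 n 1).foldl (fun obj i =>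
      let rc :=
        (PySem.List.pyRange 0 n 1).foldl (fun (p : Int × Int) j =>
          (p.1 + PySem.List.pyGetD x (i * n + j) 0,
           p.2 + PySem.List.pyGetD x (j * n + i) 0)) (0, 0)
      obj + |rc.1 - M| + |rc.2 - M|) 0
  let d :=
    (PySem.List.pyRange 0 n 1).foldl (fun (p : Int × Int) i =>
      (p.1 + PySem.List.pyGetD x (i * n + i) 0,
       p.2 + PySem.List.pyGetD x (i * n + (n - i - 1)) 0)) (0, 0)
  obj + |d.1 - M| + |d.2 - M|

-- ===== PORT B =====
-- rows[i] += v / cols[j] += v are ported with pyGetD/pySetD (inside the loop the index is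
-- always in range, so these agree with Python's indexing there).
def evaluate_alt (x : List Int) (n : Int) (M : Int) : Int :=
  let rows0 : List Int := PySem.List.pyRepeat [0] n
  let cols0 : List Int := PySem.List.pyRepeat [0] n
  let st :=
    (PySem.List.pyRange 0 ((rows0.length : Int) * (cols0.length : Int)) 1).foldl
      (fun (st : (List Int × List Int) × (Int × Int)) k =>
        let i := PySem.Int.floordiv k n
        let j := PySem.Int.mod k n
        let v := PySem.List.pyGetD x k 0
        ((PySem.List.pySetD st.1.1 i (PySem.List.pyGetD st.1.1 i 0 + v),
          PySem.List.pySetD st.1.2 j (PySem.List.pyGetD st.1.2 j 0 + v)),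
         (if i == j then st.2.1 + v else st.2.1,
          if i + j == n - 1 then st.2.2 + v else st.2.2)))
      ((rows0, cols0), (0, 0))
  (st.1.1.map (fun s => |s - M|)).sum
    + (st.1.2.map (fun s => |s - M|)).sum
    + |st.2.1 - M| + |st.2.2 - M|

-- ===== PRECONDITION & SPEC =====
-- Pre_ excludes exactly the inputs where the Python A raises IndexError (n ≥ 0 with fewer
-- than n*n entries); for n < 0 all loops are empty and A returns normally, so n < 0 is admitted.
def Pre_evaluate (x : List Int) (n : Int) (M : Int) : Prop :=
  n < 0 ∨ n * n ≤ (x.length : Int)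
instance (x : List Int) (n : Int) (M : Int) : Decidable (Pre_evaluate x n M) := by
  unfold Pre_evaluate; infer_instance

def pvWitness_evaluate : List Int × Int × Int := ([2, 7, 6, 9, 5, 1, 4, 3, 8], 3, 15)

def Spec_evaluate (x : List Int) (n : Int) (M : Int) (out : Int) : Prop := out = evaluate_alt x n M
instance (x : List Int) (n : Int) (M : Int) (out : Int) : Decidable (Spec_evaluate x n M out) := by
  unfold Spec_evaluate; infer_instance

-- ===== CLAIM (what is proved, stated in full; the proofs are below) =====
def Claim_equal_evaluate : Prop := ∀ (x : List Int) (n : Int) (M : Int), Dom_evaluate x n M → Pre_evaluate x n M → Spec_evaluate x n M (evaluate x n M)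

-- ===== LEMMAS AND PROOFS =====

theorem range_mul_flatMap (a N : Nat) :
    List.range (a * N) = (List.range a).flatMap (fun i => (List.range N).map (fun j => i * N + j)) := by
  induction a with
  | zero => simp
  | succ a ih =>
      rw [List.range_succ, List.flatMap_append, ← ih, Nat.succ_mul, List.range_add]
      simp

theorem range_filter_beq (a m : Nat) :
    (List.range a).filter (fun j => j == m) = if m < a then [m] else [] := by
  induction a with
  | zero => simp
  | succ a ih =>
      rw [List.range_succ, List.filter_append, ih]
      by_cases h : m < a
      · have h3 : ¬ a = m := by omega
        simp [h, Nat.lt_succ_of_lt h, h3]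
      · by_cases h2 : a = m
        · subst h2; simp
        · have : ¬ m < a + 1 := by omega
          simp [h, h2, this]

theorem flatMap_range_if {β : Type} (a m : Nat) (g : Nat → List β) :
    (List.range a).flatMap (fun i => if i = m then g i else []) = if m < a then g m else [] := by
  induction a with
  | zero => simp
  | succ a ih =>
      rw [List.range_succ, List.flatMap_append, ih]
      by_cases h : m < a
      · have : a ≠ m := by omega
        simp [h, Nat.lt_succ_of_lt h, this]
      · by_cases h2 : a = m
        · subst h2; simp
        · have : ¬ m < a + 1 := by omega
          simp [h, h2, this]

theorem setfold_length (key : Nat → Nat) (w : Nat → Int) (l : List Nat) (r0 : List Int) :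
    (l.foldl (fun r k => r.set (key k) (r.getD (key k) 0 + w k)) r0).length = r0.length := by
  induction l generalizing r0 with
  | nil => rfl
  | cons h t ih => rw [List.foldl_cons, ih]; exact List.length_set

theorem setfold_getD (key : Nat → Nat) (w : Nat → Int) (l : List Nat) (r0 : List Int)
    (hk : ∀ k ∈ l, key k < r0.length) (m : Nat) :
    (l.foldl (fun r k => r.set (key k) (r.getD (key k) 0 + w k)) r0).getD m 0
      = r0.getD m 0 + ((l.filter (fun k => key k == m)).map w).sum := by
  induction l generalizing r0 with
  | nil => simp
  | cons h t ih =>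
      have hlt : key h < r0.length := hk h (by simp)
      rw [List.foldl_cons, ih _ (by intro k hkmem; simpa [List.length_set] using hk k (by simp [hkmem]))]
      by_cases he : key h = m
      · subst he
        rw [List.getD_eq_getElem?_getD, List.getElem?_set_self hlt]
        simp [List.getD_eq_getElem?_getD]
        ring
      · rw [List.getD_eq_getElem?_getD, List.getElem?_set_ne he]
        simp [List.getD_eq_getElem?_getD, he]

theorem map_eq_map_range (l : List Int) (f : Int → Int) :
    l.map f = (List.range l.length).map (fun m => f (l.getD m 0)) := by
  apply List.ext_getElem
  · simp
  · intro i h1 h2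
    simp only [List.getElem_map, List.getElem_range]
    rw [List.getD_eq_getElem l 0 (by simpa using h1)]

theorem block_div (N i j : Nat) (hj : j < N) : (i * N + j) / N = i := by
  rw [Nat.mul_comm, Nat.add_comm, Nat.add_mul_div_left j i (by omega), Nat.div_eq_of_lt hj, Nat.zero_add]

theorem block_mod (N i j : Nat) (hj : j < N) : (i * N + j) % N = j := by
  rw [Nat.mul_comm, Nat.add_comm, Nat.add_mul_mod_self_left, Nat.mod_eq_of_lt hj]

theorem filter_range_div (N m : Nat) (hm : m < N) :
    (List.range (N * N)).filter (fun k => k / N == m) = (List.range N).map (fun j => m * N + j) := by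
  rw [range_mul_flatMap, List.filter_flatMap]
  have hb : ∀ i ∈ List.range N,
      (fun i => ((List.range N).map (fun j => i * N + j)).filter (fun k => k / N == m)) i
        = (fun i => if i = m then (List.range N).map (fun j => i * N + j) else []) i := by
    intro i hi
    simp only [List.filter_map]
    rw [List.filter_congr (q := fun j => i == m)
        (by intro j hj
            have hj' : j < N := by simpa using hj
            show ((i * N + j) / N == m) = (i == m)
            rw [block_div N i j hj'])]
    by_cases he : i = m
    · simp [he]
    · simp [he]
  rw [List.flatMap_congr hb, flatMap_range_if, if_pos hm]

theorem filter_range_mod (N m : Nat) (hm : m < N) :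
    (List.range (N * N)).filter (fun k => k % N == m) = (List.range N).map (fun i => i * N + m) := by
  rw [range_mul_flatMap, List.filter_flatMap]
  have hb : ∀ i ∈ List.range N,
      (fun i => ((List.range N).map (fun j => i * N + j)).filter (fun k => k % N == m)) i
        = (fun i => [i * N + m]) i := by
    intro i hi
    simp only [List.filter_map]
    rw [List.filter_congr (q := fun j => j == m)
        (by intro j hj
            have hj' : j < N := by simpa using hj
            show ((i * N + j) % N == m) = (j == m)
            rw [block_mod N i j hj'])]
    rw [range_filter_beq, if_pos hm]
    simp
  rw [List.flatMap_congr hb, ← List.map_eq_flatMap]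

theorem filter_range_diag (N : Nat) :
    (List.range (N * N)).filter (fun k => k / N == k % N) = (List.range N).map (fun i => i * N + i) := by
  rw [range_mul_flatMap, List.filter_flatMap]
  have hb : ∀ i ∈ List.range N,
      (fun i => ((List.range N).map (fun j => i * N + j)).filter (fun k => k / N == k % N)) i
        = (fun i => [i * N + i]) i := by
    intro i hi
    simp only [List.filter_map]
    simp at hi
    rw [List.filter_congr (q := fun j => j == i)
        (by intro j hj
            have hj' : j < N := by simpa using hj
            show ((i * N + j) / N == (i * N + j) % N) = (j == i)
            rw [block_div N i j hj', block_mod N i j hj', Bool.eq_iff_iff]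
            simp [beq_iff_eq]
            constructor <;> omega)]
    rw [range_filter_beq, if_pos hi]
    simp
  rw [List.flatMap_congr hb, ← List.map_eq_flatMap]

theorem filter_range_anti (N : Nat) :
    (List.range (N * N)).filter (fun k => k / N + k % N == N - 1)
      = (List.range N).map (fun i => i * N + (N - 1 - i)) := by
  rw [range_mul_flatMap, List.filter_flatMap]
  have hb : ∀ i ∈ List.range N,
      (fun i => ((List.range N).map (fun j => i * N + j)).filter (fun k => k / N + k % N == N - 1)) i
        = (fun i => [i * N + (N - 1 - i)]) i := by
    intro i hi
    simp only [List.filter_map]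
    simp at hi
    rw [List.filter_congr (q := fun j => j == N - 1 - i)
        (by intro j hj
            have hj' : j < N := by simpa using hj
            show ((i * N + j) / N + (i * N + j) % N == N - 1) = (j == N - 1 - i)
            rw [block_div N i j hj', block_mod N i j hj', Bool.eq_iff_iff]
            simp [beq_iff_eq]
            constructor <;> omega)]
    rw [range_filter_beq, if_pos (by omega)]
    simp
  rw [List.flatMap_congr hb, ← List.map_eq_flatMap]

-- A-side: a fold accumulating a pair of sums is the pair of sums
theorem foldl_pair_sum {A : Type} (f g : A → Int) (l : List A) (a b : Int) :
    l.foldl (fun (p : Int × Int) j => (p.1 + f j, p.2 + g j)) (a, b)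
      = (a + (l.map f).sum, b + (l.map g).sum) := by
  induction l generalizing a b with
  | nil => simp
  | cons h t ih => simp [ih]; constructor <;> ring

theorem foldl_obj (x : List Int) (n M : Int) (l : List Int) (a : Int) :
    l.foldl (fun obj i =>
        obj + |((PySem.List.pyRange 0 n 1).map (fun j => PySem.List.pyGetD x (i * n + j) 0)).sum - M|
            + |((PySem.List.pyRange 0 n 1).map (fun j => PySem.List.pyGetD x (j * n + i) 0)).sum - M|) a
      = a + (l.map (fun i => |((PySem.List.pyRange 0 n 1).map (fun j => PySem.List.pyGetD x (i * n + j) 0)).sum - M|)).sum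
          + (l.map (fun i => |((PySem.List.pyRange 0 n 1).map (fun j => PySem.List.pyGetD x (j * n + i) 0)).sum - M|)).sum := by
  induction l generalizing a with
  | nil => simp
  | cons h t ih => simp [ih]; ring

def lineSum (x : List Int) (idx : Nat → Nat) (N : Nat) : Int :=
  ((List.range N).map (fun j => x.getD (idx j) 0)).sum

theorem a_pos (x : List Int) (N : Nat) (M : Int) :
    evaluate x ((N : Nat) : Int) M
      = ((List.range N).map (fun m => |lineSum x (fun j => m * N + j) N - M|)).sum
      + ((List.range N).map (fun m => |lineSum x (fun j => j * N + m) N - M|)).sum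
      + |lineSum x (fun i => i * N + i) N - M|
      + |((List.range N).map (fun i => x.getD (i * N + (N - 1 - i)) 0)).sum - M| := by
  unfold evaluate
  simp only [foldl_pair_sum, zero_add]
  rw [foldl_obj]
  simp only [PySem.List.pyRange_zero_natCast, List.map_map, Function.comp_def, zero_add]
  have hcast : ∀ (a b : Nat), PySem.List.pyGetD x ((a : Int) * (N : Int) + (b : Int)) 0
      = x.getD (a * N + b) 0 := by
    intro a b
    rw [show ((a : Int) * N + b) = ((a * N + b : Nat) : Int) by push_cast; ring,
        PySem.List.pyGetD_natCast]
  unfold lineSum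
  have hrow : ∀ m : Nat,
      List.map (fun j : Nat => PySem.List.pyGetD x ((m : Int) * N + j) 0) (List.range N)
        = List.map (fun j => x.getD (m * N + j) 0) (List.range N) :=
    fun m => List.map_congr_left (fun j _ => hcast m j)
  have hcol : ∀ m : Nat,
      List.map (fun j : Nat => PySem.List.pyGetD x ((j : Int) * N + m) 0) (List.range N)
        = List.map (fun j => x.getD (j * N + m) 0) (List.range N) :=
    fun m => List.map_congr_left (fun j _ => hcast j m)
  have hanti :
      List.map (fun i : Nat => PySem.List.pyGetD x ((i : Int) * N + ((N : Int) - i - 1)) 0) (List.range N)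
        = List.map (fun i => x.getD (i * N + (N - 1 - i)) 0) (List.range N) := by
    apply List.map_congr_left
    intro i hi
    have hi' : i < N := by simpa using hi
    have h1 : ((N - 1 - i : Nat) : Int) = (N : Int) - i - 1 := by omega
    rw [show ((i : Int) * N + ((N : Int) - i - 1)) = ((i * N + (N - 1 - i) : Nat) : Int) by
          rw [Nat.cast_add, Nat.cast_mul, h1], PySem.List.pyGetD_natCast]
  congr 1
  · congr 1
    · congr 1
      · exact congrArg List.sum (List.map_congr_left (fun m _ => by rw [hrow m]))
      · exact congrArg List.sum (List.map_congr_left (fun m _ => by rw [hcol m]))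
    · rw [List.map_congr_left (fun i (_ : i ∈ List.range N) => hcast i i)]
  · rw [hanti]

theorem getD_replicate_zero (N m : Nat) : (List.replicate N (0 : Int)).getD m 0 = 0 := by
  rw [List.getD_eq_getElem?_getD, List.getElem?_replicate]
  split <;> rfl

theorem rows_fold_sum (x : List Int) (N : Nat) (M : Int) :
    (List.map (fun s => |s - M|)
        (List.foldl (fun r k => r.set (k / N) (r.getD (k / N) 0 + x.getD k 0))
          (List.replicate N 0) (List.range (N * N)))).sum
      = ((List.range N).map (fun m => |lineSum x (fun j => m * N + j) N - M|)).sum := by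
  have hk : ∀ k ∈ List.range (N * N), (fun k => k / N) k < (List.replicate (N : Nat) (0 : Int)).length := by
    intro k hkm
    simp at hkm ⊢
    exact Nat.div_lt_of_lt_mul hkm
  have hlen := setfold_length (fun k => k / N) (fun k => x.getD k 0)
      (List.range (N * N)) (List.replicate N 0)
  rw [map_eq_map_range]
  simp only [hlen, List.length_replicate]
  apply congrArg List.sum
  apply List.map_congr_left
  intro m hm
  have hm' : m < N := by simpa using hm
  have h2 := setfold_getD (fun k => k / N) (fun k => x.getD k 0)
      (List.range (N * N)) (List.replicate N 0) hk m
  simp only [] at h2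
  rw [h2, getD_replicate_zero, filter_range_div N m hm', List.map_map, zero_add]
  rfl

theorem cols_fold_sum (x : List Int) (N : Nat) (M : Int) :
    (List.map (fun s => |s - M|)
        (List.foldl (fun r k => r.set (k % N) (r.getD (k % N) 0 + x.getD k 0))
          (List.replicate N 0) (List.range (N * N)))).sum
      = ((List.range N).map (fun m => |lineSum x (fun j => j * N + m) N - M|)).sum := by
  have hk : ∀ k ∈ List.range (N * N), (fun k => k % N) k < (List.replicate (N : Nat) (0 : Int)).length := by
    intro k hkm
    simp at hkm ⊢
    have hN0 : N ≠ 0 := by rintro rfl; omega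
    exact Nat.mod_lt k (Nat.pos_of_ne_zero hN0)
  have hlen := setfold_length (fun k => k % N) (fun k => x.getD k 0)
      (List.range (N * N)) (List.replicate N 0)
  rw [map_eq_map_range]
  simp only [hlen, List.length_replicate]
  apply congrArg List.sum
  apply List.map_congr_left
  intro m hm
  have hm' : m < N := by simpa using hm
  have h2 := setfold_getD (fun k => k % N) (fun k => x.getD k 0)
      (List.range (N * N)) (List.replicate N 0) hk m
  simp only [] at h2
  rw [h2, getD_replicate_zero, filter_range_mod N m hm', List.map_map, zero_add]
  rfl

theorem diag_fold_sum (x : List Int) (N : Nat) :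
    List.foldl (fun a k => if k / N = k % N then a + x.getD k 0 else a) 0 (List.range (N * N))
      = lineSum x (fun i => i * N + i) N := by
  rw [PySem.List.foldl_ite_eq_foldl_filter (p := fun k => k / N = k % N)
      (f := fun (a : Int) k => a + x.getD k 0)]
  rw [List.filter_congr (q := fun k => k / N == k % N)
      (by intro k _; rw [Bool.eq_iff_iff]; simp)]
  rw [filter_range_diag, PySem.List.foldl_add, List.map_map, zero_add]
  rfl

theorem anti_fold_sum (x : List Int) (N : Nat) :
    List.foldl (fun a k => if k / N + k % N = N - 1 then a + x.getD k 0 else a) 0 (List.range (N * N))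
      = ((List.range N).map (fun i => x.getD (i * N + (N - 1 - i)) 0)).sum := by
  rw [PySem.List.foldl_ite_eq_foldl_filter (p := fun k => k / N + k % N = N - 1)
      (f := fun (a : Int) k => a + x.getD k 0)]
  rw [List.filter_congr (q := fun k => k / N + k % N == N - 1)
      (by intro k _; rw [Bool.eq_iff_iff]; simp)]
  rw [filter_range_anti, PySem.List.foldl_add, List.map_map, zero_add]
  rfl

theorem alt_pos (x : List Int) (N : Nat) (hN : 0 < N) (M : Int) :
    evaluate_alt x ((N : Nat) : Int) M
      = ((List.range N).map (fun m => |lineSum x (fun j => m * N + j) N - M|)).sum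
      + ((List.range N).map (fun m => |lineSum x (fun j => j * N + m) N - M|)).sum
      + |lineSum x (fun i => i * N + i) N - M|
      + |((List.range N).map (fun i => x.getD (i * N + (N - 1 - i)) 0)).sum - M| := by
  unfold evaluate_alt
  simp only [PySem.List.pyRepeat_singleton, Int.toNat_natCast, List.length_replicate]
  rw [show ((N : Int) * N) = ((N * N : Nat) : Int) by push_cast; ring,
      PySem.List.pyRange_zero_natCast, List.foldl_map]
  have hc : ∀ k : Nat, (((k / N : Nat) : Int) + ((k % N : Nat) : Int) = (N : Int) - 1)
      ↔ (k / N + k % N = N - 1) := by intro k; omega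
  simp only [PySem.Int.floordiv_natCast, PySem.Int.mod_natCast, PySem.List.pyGetD_natCast,
    PySem.List.pySetD_natCast, beq_iff_eq, Nat.cast_inj, hc]
  rw [PySem.List.foldl_prod_mk
      (f := fun (p : List Int × List Int) (k : Nat) =>
        (p.1.set (k / N) (p.1.getD (k / N) 0 + x.getD k 0),
         p.2.set (k % N) (p.2.getD (k % N) 0 + x.getD k 0)))
      (g := fun (q : Int × Int) (k : Nat) =>
        (if k / N = k % N then q.1 + x.getD k 0 else q.1,
         if k / N + k % N = N - 1 then q.2 + x.getD k 0 else q.2))]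
  rw [PySem.List.foldl_prod_mk
      (f := fun (r : List Int) (k : Nat) => r.set (k / N) (r.getD (k / N) 0 + x.getD k 0))
      (g := fun (r : List Int) (k : Nat) => r.set (k % N) (r.getD (k % N) 0 + x.getD k 0))]
  rw [PySem.List.foldl_prod_mk
      (f := fun (a : Int) (k : Nat) => if k / N = k % N then a + x.getD k 0 else a)
      (g := fun (a : Int) (k : Nat) => if k / N + k % N = N - 1 then a + x.getD k 0 else a)]
  dsimp only
  rw [rows_fold_sum, cols_fold_sum, diag_fold_sum, anti_fold_sum]

theorem evaluate_eq_alt (x : List Int) (n : Int) (M : Int) :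
    evaluate x n M = evaluate_alt x n M := by
  by_cases hn : n ≤ 0
  · have h2 : n.toNat = 0 := by omega
    simp [evaluate, evaluate_alt, h2, PySem.List.pyRepeat_singleton, PySem.List.pyRange]
  · have hN : n = ((n.toNat : Nat) : Int) := by omega
    rw [hN, a_pos, alt_pos x n.toNat (by omega) M]

-- ===== VERDICT (by name: the statement is the Claim_ definition above) =====
theorem evaluate_spec : Claim_equal_evaluate := by
  intro x n M _ _
  unfold Spec_evaluate
  exact evaluate_eq_alt x n M
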